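-- pv_equiv track=rewrite | github.com/Jaeseed/TIL | Algorithm/Baekjoon/Gold/2661_좋은수열.py | check
-- ===== SOURCE A (Python) =====
-- def check(now, step):
--     for i in range(1, step // 2 + 1):
--         cnt = 0
--         for j in range(i):
--             if now[step-1-j] == now[step-1-j-i]:
--                 cnt += 1
--         if i == cnt:
--             return False
--     return True
-- ===== SOURCE B (Python) =====
-- def check(now, step):
--     half = step // 2
--     if half < 1:
--         return True
--     t = now[:step][::-1]
--     n = len(t)
--     z = [0] * (half + 1)
--     l, r = 0, 0
--     for i in range(1, half + 1):
--         k = 0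
--         if i < r:
--             k = min(r - i, z[i - l])
--         while i + k < n and t[i + k] == t[k]:
--             k += 1
--         z[i] = k
--         if k >= i:
--             return False
--         if i + k > r:
--             l, r = i, i + k
--     return True
-- ===== Notes on version B (the rewrite author's own statement) =====
-- stated objective: faster
-- what changed: Replaces A's nested loop (for each block length i, recount all i character pairs at the suffix end) with a single Z-function scan of the reversed prefix now[:step], reporting a square as soon as z[i] >= i: O(step) instead of O(step^2) in the worst case.
import Mathlib
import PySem

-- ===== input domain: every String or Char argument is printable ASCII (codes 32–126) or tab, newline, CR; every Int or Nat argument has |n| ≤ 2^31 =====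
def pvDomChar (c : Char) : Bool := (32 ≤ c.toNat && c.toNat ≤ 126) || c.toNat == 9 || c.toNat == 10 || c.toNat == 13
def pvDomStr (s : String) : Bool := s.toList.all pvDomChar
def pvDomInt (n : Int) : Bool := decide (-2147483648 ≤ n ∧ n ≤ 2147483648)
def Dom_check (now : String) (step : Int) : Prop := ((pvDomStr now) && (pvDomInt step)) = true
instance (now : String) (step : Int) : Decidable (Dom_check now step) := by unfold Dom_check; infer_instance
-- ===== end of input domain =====

-- B replaces A's quadratic block-by-block comparison with a worst-case linear Z-function scan
-- of the reversed prefix now[:step] (objective: faster).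

-- ===== PORT A =====
-- inner loop: cnt = number of j in range(i) with now[step-1-j] == now[step-1-j-i]
def checkInnerA (now : String) (step : Int) (i : Int) : Int :=
  (PySem.List.pyRange 0 i 1).foldl
    (fun cnt j =>
      if PySem.Str.pyGet? now (step - 1 - j) == PySem.Str.pyGet? now (step - 1 - j - i)
      then cnt + 1 else cnt) 0

-- outer loop; the early 'return False' becomes recursion over the remaining i's
def checkLoopA (now : String) (step : Int) : List Int → Bool
  | [] => true
  | i :: rest =>
      if i == checkInnerA now step i then false
      else checkLoopA now step rest

def check (now : String) (step : Int) : Bool :=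
  checkLoopA now step (PySem.List.pyRange 1 (PySem.Int.floordiv step 2 + 1) 1)

-- ===== PORT B =====
-- the while loop: while i + k < n and t[i+k] == t[k]: k += 1
-- (structural fuel = (n - (i+k)).toNat, the number of iterations left; the loop test i + k < n
-- is still performed literally, so the result is the same)
def extB (t : List Char) (n i : Int) : Nat → Int → Int
  | 0, k => k
  | fuel + 1, k =>
      if decide (i + k < n) && (PySem.List.pyGetD t (i + k) ' ' == PySem.List.pyGetD t k ' ') then
        extB t n i fuel (k + 1)
      else k

-- the for loop over i, carrying z, l, r; early 'return False' as recursion over the i's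
def loopB (t : List Char) (n : Int) : List Int → List Int → Int → Int → Bool
  | [], _, _, _ => true
  | i :: rest, z, l, r =>
      let k0 : Int := if i < r then min (r - i) (PySem.List.pyGetD z (i - l) 0) else 0
      let k : Int := extB t n i (n - (i + k0)).toNat k0
      let z' := PySem.List.pySetD z i k
      if i ≤ k then false
      else if r < i + k then loopB t n rest z' i (i + k)
      else loopB t n rest z' l r

def check_alt (now : String) (step : Int) : Bool :=
  let half := PySem.Int.floordiv step 2
  if half < 1 then true
  else
    -- t = now[:step][::-1]  (s[::-1] is reverse: PySem.List.slice?_none_none_neg_one)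
    let t := (PySem.List.slice now.toList none (some step)).reverse
    let n : Int := (t.length : Int)
    let z := PySem.List.pyRepeat [(0 : Int)] (half + 1)
    loopB t n (PySem.List.pyRange 1 (half + 1) 1) z 0 0

-- ===== PRECONDITION & SPEC =====
-- Pre_ excludes exactly the inputs (2 ≤ step and step > len(now)) on which A raises IndexError.
def Pre_check (now : String) (step : Int) : Prop :=
  step < 2 ∨ step ≤ (now.toList.length : Int)
instance (now : String) (step : Int) : Decidable (Pre_check now step) := by
  unfold Pre_check; infer_instance

def pvWitness_check : String × Int := ("aba", 3)

def Spec_check (now : String) (step : Int) (out : Bool) : Prop := out = check_alt now step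
instance (now : String) (step : Int) (out : Bool) : Decidable (Spec_check now step out) := by
  unfold Spec_check; infer_instance

-- ===== CLAIM (what is proved, stated in full; the proofs are below) =====
def Claim_equal_check : Prop := ∀ (now : String) (step : Int),
  Dom_check now step → Pre_check now step → Spec_check now step (check now step)

-- ===== LEMMAS AND PROOFS =====

def lcp : List Char → List Char → Nat
  | a :: as, b :: bs => if a = b then lcp as bs + 1 else 0
  | _, _ => 0

theorem le_lcp_iff : ∀ (k : Nat) (xs ys : List Char),
    k ≤ lcp xs ys ↔ k ≤ xs.length ∧ k ≤ ys.length ∧ ∀ j < k, xs[j]? = ys[j]? := by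
  intro k xs
  induction xs generalizing k with
  | nil =>
    intro ys
    have h0 : lcp [] ys = 0 := by cases ys <;> simp [lcp]
    rw [h0]
    constructor
    · intro h
      have hk : k = 0 := by omega
      subst hk; simp
    · rintro ⟨h1, -, -⟩
      simpa using h1
  | cons a as ih =>
    intro ys
    cases ys with
    | nil =>
      simp only [lcp]
      constructor
      · intro h
        have hk : k = 0 := by omega
        subst hk; simp
      · rintro ⟨-, h2, -⟩
        simp at h2; omega
    | cons b bs =>
      by_cases hab : a = b
      · simp only [lcp, if_pos hab]
        cases k with
        | zero => simp
        | succ k' =>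
          rw [Nat.succ_le_succ_iff, ih k' bs]
          simp only [List.length_cons, Nat.succ_le_succ_iff]
          constructor
          · rintro ⟨h1, h2, h3⟩
            refine ⟨h1, h2, ?_⟩
            intro j hj
            cases j with
            | zero => simp [hab]
            | succ j' => simpa using h3 j' (by omega)
          · rintro ⟨h1, h2, h3⟩
            refine ⟨h1, h2, ?_⟩
            intro j hj
            simpa using h3 (j + 1) (by omega)
      · simp only [lcp, if_neg hab]
        constructor
        · intro h
          have hk : k = 0 := by omega
          subst hk; simp
        · rintro ⟨-, -, h3⟩
          by_contra hk
          have := h3 0 (by omega)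
          simp at this
          exact hab this

theorem lcp_lt_ne : ∀ (xs ys : List Char), lcp xs ys < xs.length → lcp xs ys < ys.length →
    xs[lcp xs ys]? ≠ ys[lcp xs ys]? := by
  intro xs
  induction xs with
  | nil => intro ys h1 _; simp at h1
  | cons a as ih =>
    intro ys h1 h2
    cases ys with
    | nil => simp at h2
    | cons b bs =>
      by_cases hab : a = b
      · simp only [lcp, if_pos hab] at *
        have := ih bs (by simpa using h1) (by simpa using h2)
        simpa using this
      · simp only [lcp, if_neg hab] at *
        simp [hab]

theorem lcp_le_right (xs ys : List Char) : lcp xs ys ≤ ys.length :=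
  ((le_lcp_iff _ xs ys).mp le_rfl).2.1

def zf (t : List Char) (i : Nat) : Nat := lcp t (t.drop i)

theorem zf_le (t : List Char) (i : Nat) : zf t i ≤ t.length - i := by
  have := lcp_le_right t (t.drop i); simpa [zf] using this

theorem zf_prefix (t : List Char) (i : Nat) : ∀ j < zf t i, t[j]? = t[i + j]? := by
  intro j hj
  have h := (le_lcp_iff (lcp t (t.drop i)) t (t.drop i)).mp le_rfl
  have := h.2.2 j hj
  simpa [List.getElem?_drop] using this

theorem le_zf_of (t : List Char) (i k : Nat) (hik : i + k ≤ t.length)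
    (h : ∀ j < k, t[j]? = t[i + j]?) : k ≤ zf t i := by
  apply (le_lcp_iff k t (t.drop i)).mpr
  refine ⟨by omega, by simp; omega, ?_⟩
  intro j hj
  simpa [List.getElem?_drop] using h j hj

theorem extB_eq (t : List Char) (i : Nat) (hi : 1 ≤ i) (hilen : i ≤ t.length) :
    ∀ (fuel k : Nat), k ≤ zf t i → i + k + fuel = t.length →
    extB t (t.length : Int) (i : Int) fuel (k : Int) = ((zf t i : Nat) : Int) := by
  intro fuel
  induction fuel with
  | zero =>
    intro k hk hlen
    have hz := zf_le t i
    have : k = zf t i := by omega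
    simpa [extB] using this
  | succ fuel ih =>
    intro k hk hlen
    have hz := zf_le t i
    have hik : (i : Int) + (k : Int) < (t.length : Int) := by omega
    have hknat : ((i : Int) + (k : Int)).toNat = i + k := by omega
    have hgetik : PySem.List.pyGetD t ((i : Int) + (k : Int)) ' ' = t[i + k]'(by omega) := by
      rw [PySem.List.pyGetD_eq_getElem t ' ' (by omega) (by omega)]
      simp [hknat]
    have hgetk : PySem.List.pyGetD t ((k : Int)) ' ' = t[k]'(by omega) := by
      rw [PySem.List.pyGetD_eq_getElem t ' ' (by omega) (by omega)]
      simp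
    rcases Nat.lt_or_ge k (zf t i) with hlt | hge
    · -- chars at k agree, loop continues
      have hpre := zf_prefix t i k hlt
      have hchar : t[i + k]'(by omega) = t[k]'(by omega) := by
        have h1 : t[k]? = t[i + k]? := hpre
        rw [List.getElem?_eq_getElem (by omega), List.getElem?_eq_getElem (by omega)] at h1
        exact (Option.some_inj.mp h1).symm
      rw [extB]
      rw [if_pos (by simp [hik, hgetik, hgetk, hchar])]
      have : (k : Int) + 1 = ((k + 1 : Nat) : Int) := by push_cast; ring
      rw [this]
      exact ih (k + 1) (by omega) (by omega)
    · -- k = zf t i and chars differ: loop stops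
      have hkz : k = zf t i := by omega
      have hzz : zf t i = lcp t (t.drop i) := rfl
      have hne : t[k]? ≠ t[i + k]? := by
        have h := lcp_lt_ne t (t.drop i) (by omega) (by simp; omega)
        rw [List.getElem?_drop] at h
        rw [hkz, hzz]
        exact h
      have hchar : t[i + k]'(by omega) ≠ t[k]'(by omega) := by
        intro h
        apply hne
        rw [List.getElem?_eq_getElem (by omega), List.getElem?_eq_getElem (by omega), h]
      rw [extB]
      rw [if_neg (by simp [hgetik, hgetk]; intro _; exact fun hh => (hchar hh).elim)]
      simp [hkz]

theorem loopB_eq (t : List Char) (half : Nat) (h2 : 2 * half ≤ t.length) :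
    ∀ (fuel i : Nat), 1 ≤ i → i + fuel = half + 1 →
    ∀ (z : List Int), z.length = half + 1 →
    (∀ j : Nat, 1 ≤ j → j < i → z[j]? = some ((zf t j : Nat) : Int)) →
    ∀ (l r : Int),
    ((l = 0 ∧ r = 0) ∨
      (∃ l' : Nat, 1 ≤ l' ∧ l' < i ∧ l = (l' : Int) ∧ r = ((l' + zf t l' : Nat) : Int))) →
    loopB t (t.length : Int) (PySem.List.pyRange (i : Int) ((half : Int) + 1) 1) z l r
      = decide (∀ m : Nat, i ≤ m → m ≤ half → zf t m < m) := by
  intro fuel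
  induction fuel with
  | zero =>
    intro i hi1 hif z hzlen hz l r hlr
    have hie : i = half + 1 := by omega
    subst hie
    rw [PySem.List.pyRange_one_eq_nil (by omega)]
    simp only [loopB]
    symm
    rw [decide_eq_true_iff]
    intro m h1 h2
    omega
  | succ fuel ih =>
    intro i hi1 hif z hzlen hz l r hlr
    have hile : i ≤ half := by omega
    have hhalf1 : 1 ≤ half := by omega
    have hilen : i ≤ t.length := by omega
    rw [PySem.List.pyRange_one_cons (by omega)]
    simp only [loopB]
    -- evaluate k0
    have hk0 : ∃ k0n : Nat,
        (if (i : Int) < r then min (r - (i : Int)) (PySem.List.pyGetD z ((i : Int) - l) 0) else 0)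
          = (k0n : Int) ∧ k0n ≤ zf t i := by
      rcases hlr with ⟨hl0, hr0⟩ | ⟨l', hl1, hl2, hleq, hreq⟩
      · subst hl0; subst hr0
        refine ⟨0, by rw [if_neg (by omega)]; simp, by omega⟩
      · subst hleq; subst hreq
        by_cases hir : (i : Int) < ((l' + zf t l' : Nat) : Int)
        · have hjlt : l' < i := hl2
          set jn := i - l' with hjn
          have hcastj : (i : Int) - (l' : Int) = ((jn : Nat) : Int) := by omega
          have hzj := hz jn (by omega) (by omega)
          obtain ⟨hjr, hvz⟩ := List.getElem?_eq_some_iff.mp hzj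
          have hget : PySem.List.pyGetD z ((i : Int) - (l' : Int)) 0 = ((zf t jn : Nat) : Int) := by
            rw [hcastj, PySem.List.pyGetD_eq_getElem z 0 (by omega) (by omega)]
            simpa using hvz
          have hrsub : ((l' + zf t l' : Nat) : Int) - (i : Int)
              = ((l' + zf t l' - i : Nat) : Int) := by omega
          refine ⟨min (l' + zf t l' - i) (zf t jn), ?_, ?_⟩
          · rw [if_pos hir, hget, hrsub]
            push_cast
            omega
          · -- k0n ≤ zf t i
            have hzl := zf_le t l'
            apply le_zf_of
            · omega
            · intro q hq
              have h1 : t[q]? = t[jn + q]? := zf_prefix t jn q (by omega)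
              have h2 : t[jn + q]? = t[l' + (jn + q)]? := zf_prefix t l' (jn + q) (by omega)
              have h3 : l' + (jn + q) = i + q := by omega
              rw [h1, h2, h3]
        · refine ⟨0, by rw [if_neg hir]; simp, by omega⟩
    obtain ⟨k0n, hk0eq, hk0le⟩ := hk0
    rw [hk0eq]
    have hzle := zf_le t i
    have hfuelcast : (((t.length : Int)) - ((i : Int) + (k0n : Int))).toNat
        = t.length - (i + k0n) := by omega
    rw [hfuelcast]
    rw [extB_eq t i hi1 hilen (t.length - (i + k0n)) k0n hk0le (by omega)]
    by_cases hbig : (i : Int) ≤ ((zf t i : Nat) : Int)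
    · rw [if_pos hbig]
      symm
      rw [decide_eq_false_iff_not]
      intro h
      have := h i le_rfl hile
      omega
    · rw [if_neg hbig]
      have hzi : zf t i < i := by omega
      have hset : PySem.List.pySetD z (i : Int) ((zf t i : Nat) : Int)
          = z.set i ((zf t i : Nat) : Int) := PySem.List.pySetD_natCast z i _
      have hzlen' : (z.set i ((zf t i : Nat) : Int)).length = half + 1 := by simp [hzlen]
      have hz' : ∀ j : Nat, 1 ≤ j → j < i + 1 →
          (z.set i ((zf t i : Nat) : Int))[j]? = some ((zf t j : Nat) : Int) := by
        intro j hj1 hj2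
        rw [List.getElem?_set]
        by_cases hji : i = j
        · subst hji; simp only [hzlen]; simp only [if_true]; rw [if_pos (by omega)]
        · rw [if_neg hji]
          exact hz j hj1 (by omega)
      have hiff : (∀ m : Nat, i + 1 ≤ m → m ≤ half → zf t m < m)
          ↔ (∀ m : Nat, i ≤ m → m ≤ half → zf t m < m) := by
        constructor
        · intro h m h1 hm
          by_cases hmi : m = i
          · subst hmi; exact hzi
          · exact h m (by omega) hm
        · intro h m h1 hm
          exact h m (by omega) hm
      have hcast1 : (i : Int) + 1 = ((i + 1 : Nat) : Int) := by push_cast; ring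
      by_cases hr2 : r < (i : Int) + ((zf t i : Nat) : Int)
      · rw [if_pos hr2, hset, hcast1]
        rw [ih (i + 1) (by omega) (by omega) _ hzlen' hz' (i : Int) ((i : Int) + ((zf t i : Nat) : Int))
          (Or.inr ⟨i, hi1, by omega, rfl, by push_cast; ring⟩)]
        rw [decide_eq_decide.mpr hiff]
      · rw [if_neg hr2, hset, hcast1]
        have hlr' : ((l = 0 ∧ r = 0) ∨
            (∃ l' : Nat, 1 ≤ l' ∧ l' < i + 1 ∧ l = (l' : Int) ∧ r = ((l' + zf t l' : Nat) : Int))) := by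
          rcases hlr with h | ⟨l', a, b, c, d⟩
          · exact Or.inl h
          · exact Or.inr ⟨l', a, by omega, c, d⟩
        rw [ih (i + 1) (by omega) (by omega) _ hzlen' hz' l r hlr']
        rw [decide_eq_decide.mpr hiff]

def tOf (now : String) (step : Int) : List Char := (now.toList.take step.toNat).reverse

theorem tOf_length (now : String) (step : Int) (h2 : 2 ≤ step)
    (hlen : step ≤ (now.toList.length : Int)) : (tOf now step).length = step.toNat := by
  unfold tOf
  rw [List.length_reverse, List.length_take]
  omega

theorem tOf_get (now : String) (step : Int) (h2 : 2 ≤ step)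
    (hlen : step ≤ (now.toList.length : Int)) (q : Nat) (hq : q < step.toNat) :
    (tOf now step)[q]? = now.toList[step.toNat - 1 - q]? := by
  unfold tOf
  have hl : (now.toList.take step.toNat).length = step.toNat := by
    rw [List.length_take]; omega
  rw [List.getElem?_reverse (by rw [hl]; omega)]
  rw [hl, List.getElem?_take, if_pos (by omega)]

theorem innerA_eq (now : String) (step : Int) (h2 : 2 ≤ step)
    (hlen : step ≤ (now.toList.length : Int)) (i : Nat) (hi1 : 1 ≤ i)
    (hih : (i : Int) ≤ PySem.Int.floordiv step 2) :
    ((i : Int) == checkInnerA now step (i : Int)) = decide (i ≤ zf (tOf now step) i) := by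
  have hfd : PySem.Int.floordiv step 2 = step / 2 := PySem.Int.floordiv_eq_ediv_of_pos (by norm_num)
  have h2i : (2 * i : Int) ≤ step := by omega
  have hs2i : 2 * i ≤ step.toNat := by omega
  have hlt : (tOf now step).length = step.toNat := tOf_length now step h2 hlen
  unfold checkInnerA
  rw [PySem.List.foldl_count_if]
  rw [Bool.eq_iff_iff]
  simp only [beq_iff_eq, decide_eq_true_iff]
  have hlenr : (PySem.List.pyRange 0 (i : Int) 1).length = i := by
    rw [PySem.List.length_pyRange_one]; omega
  have hcle : List.countP
      (fun j => PySem.Str.pyGet? now (step - 1 - j) == PySem.Str.pyGet? now (step - 1 - j - (i : Int)))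
      (PySem.List.pyRange 0 (i : Int) 1) ≤ i :=
    le_of_le_of_eq List.countP_le_length hlenr
  constructor
  · intro hcnt
    -- count = i means every j matches
    have hall : ∀ j ∈ PySem.List.pyRange 0 (i : Int) 1,
        (PySem.Str.pyGet? now (step - 1 - j) == PySem.Str.pyGet? now (step - 1 - j - (i : Int))) = true := by
      apply List.countP_eq_length.mp
      rw [hlenr]; omega
    -- turn it into a prefix property of t
    apply le_zf_of _ _ _ (by omega)
    intro q hq
    have hj := hall ((q : Int)) (by rw [PySem.List.mem_pyRange_one]; omega)
    rw [beq_iff_eq] at hj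
    have e1 : step - 1 - (q : Int) = ((step.toNat - 1 - q : Nat) : Int) := by omega
    have e2 : step - 1 - (q : Int) - (i : Int) = ((step.toNat - 1 - (i + q) : Nat) : Int) := by omega
    rw [e2, e1] at hj
    simp only [PySem.Str.pyGet?] at hj
    have hb1 : PySem.Chars.pyGet? now.toList ((step.toNat - 1 - q : Nat) : Int)
        = now.toList[step.toNat - 1 - q]? := by simp [pysem]
    have hb2 : PySem.Chars.pyGet? now.toList ((step.toNat - 1 - (i + q) : Nat) : Int)
        = now.toList[step.toNat - 1 - (i + q)]? := by simp [pysem]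
    rw [hb1, hb2] at hj
    rw [tOf_get now step h2 hlen q (by omega), tOf_get now step h2 hlen (i + q) (by omega)]
    have e3 : step.toNat - 1 - (i + q) = step.toNat - 1 - q - i := by omega
    rw [hj, e3]
  · intro hzf
    have hall : ∀ j ∈ PySem.List.pyRange 0 (i : Int) 1,
        (PySem.Str.pyGet? now (step - 1 - j) == PySem.Str.pyGet? now (step - 1 - j - (i : Int))) = true := by
      intro j hj
      rw [PySem.List.mem_pyRange_one] at hj
      set q : Nat := j.toNat with hqdef
      have hjq : j = (q : Int) := by omega
      have hql : q < i := by omega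
      have hpre := zf_prefix (tOf now step) i q (by omega)
      rw [tOf_get now step h2 hlen q (by omega), tOf_get now step h2 hlen (i + q) (by omega)] at hpre
      rw [beq_iff_eq, hjq]
      have e1 : step - 1 - (q : Int) = ((step.toNat - 1 - q : Nat) : Int) := by omega
      have e2 : step - 1 - (q : Int) - (i : Int) = ((step.toNat - 1 - (i + q) : Nat) : Int) := by omega
      rw [e2, e1]
      simp only [PySem.Str.pyGet?]
      have hb1 : PySem.Chars.pyGet? now.toList ((step.toNat - 1 - q : Nat) : Int)
          = now.toList[step.toNat - 1 - q]? := by simp [pysem]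
      have hb2 : PySem.Chars.pyGet? now.toList ((step.toNat - 1 - (i + q) : Nat) : Int)
          = now.toList[step.toNat - 1 - (i + q)]? := by simp [pysem]
      rw [hb1, hb2]
      exact hpre
    have := List.countP_eq_length.mpr hall
    rw [hlenr] at this
    omega

theorem loopA_eq (now : String) (step : Int) (h2 : 2 ≤ step)
    (hlen : step ≤ (now.toList.length : Int)) :
    ∀ (fuel i : Nat), 1 ≤ i → i + fuel = (PySem.Int.floordiv step 2).toNat + 1 →
    checkLoopA now step (PySem.List.pyRange (i : Int) (((PySem.Int.floordiv step 2).toNat : Int) + 1) 1)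
      = decide (∀ m : Nat, i ≤ m → m ≤ (PySem.Int.floordiv step 2).toNat →
          zf (tOf now step) m < m) := by
  intro fuel
  set halfN := (PySem.Int.floordiv step 2).toNat with hhn
  induction fuel with
  | zero =>
    intro i hi1 hif
    rw [PySem.List.pyRange_one_eq_nil (by omega)]
    simp only [checkLoopA]
    symm; rw [decide_eq_true_iff]; intro m hm1 hm2; omega
  | succ fuel ih =>
    intro i hi1 hif
    have hfd : PySem.Int.floordiv step 2 = step / 2 :=
      PySem.Int.floordiv_eq_ediv_of_pos (by norm_num)
    rw [PySem.List.pyRange_one_cons (by omega)]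
    simp only [checkLoopA]
    rw [innerA_eq now step h2 hlen i hi1 (by omega)]
    by_cases hbig : i ≤ zf (tOf now step) i
    · rw [if_pos (by rw [decide_eq_true_iff]; exact hbig)]
      symm; rw [decide_eq_false_iff_not]
      intro h
      have := h i le_rfl (by omega)
      omega
    · have hzi : zf (tOf now step) i < i := by omega
      rw [if_neg (by rw [decide_eq_true_iff]; exact hbig)]
      have hcast1 : (i : Int) + 1 = ((i + 1 : Nat) : Int) := by push_cast; ring
      rw [hcast1, ih (i + 1) (by omega) (by omega)]
      apply decide_eq_decide.mpr
      constructor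
      · intro h m h1 hm
        by_cases hmi : m = i
        · subst hmi; exact hzi
        · exact h m (by omega) hm
      · intro h m h1 hm
        exact h m (by omega) hm

theorem check_eq (now : String) (step : Int) (hpre : Pre_check now step) :
    check now step
      = decide (∀ m : Nat, 1 ≤ m → m ≤ (PySem.Int.floordiv step 2).toNat →
          zf (tOf now step) m < m) := by
  have hfd : PySem.Int.floordiv step 2 = step / 2 :=
    PySem.Int.floordiv_eq_ediv_of_pos (by norm_num)
  unfold check
  by_cases hs : step < 2
  · rw [PySem.List.pyRange_one_eq_nil (by omega)]
    simp only [checkLoopA]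
    symm; rw [decide_eq_true_iff]
    intro m h1 h2
    omega
  · have hlen : step ≤ (now.toList.length : Int) := by
      rcases hpre with h | h
      · omega
      · exact h
    have hcast : PySem.Int.floordiv step 2 + 1
        = (((PySem.Int.floordiv step 2).toNat : Nat) : Int) + 1 := by omega
    have h := loopA_eq now step (by omega) hlen (PySem.Int.floordiv step 2).toNat 1
      (by omega) (by omega)
    rw [Nat.cast_one] at h
    rw [hcast, h]

theorem check_alt_eq (now : String) (step : Int) (hpre : Pre_check now step) :
    check_alt now step
      = decide (∀ m : Nat, 1 ≤ m → m ≤ (PySem.Int.floordiv step 2).toNat →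
          zf (tOf now step) m < m) := by
  have hfd : PySem.Int.floordiv step 2 = step / 2 :=
    PySem.Int.floordiv_eq_ediv_of_pos (by norm_num)
  simp only [check_alt]
  by_cases hs : step < 2
  · rw [if_pos (by omega)]
    symm; rw [decide_eq_true_iff]
    intro m h1 h2
    omega
  · have hlen : step ≤ (now.toList.length : Int) := by
      rcases hpre with h | h
      · omega
      · exact h
    rw [if_neg (by omega)]
    set halfN := (PySem.Int.floordiv step 2).toNat with hhn
    have hslice : PySem.List.slice now.toList none (some step) = now.toList.take step.toNat :=
      PySem.List.slice_to now.toList (by omega)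
    rw [hslice]
    have ht : (now.toList.take step.toNat).reverse = tOf now step := rfl
    rw [ht]
    rw [PySem.List.pyRepeat_singleton]
    have hlt : (tOf now step).length = step.toNat := tOf_length now step (by omega) hlen
    have hrep : (PySem.Int.floordiv step 2 + 1).toNat = halfN + 1 := by omega
    rw [hrep]
    have hcast : PySem.Int.floordiv step 2 + 1 = ((halfN : Nat) : Int) + 1 := by omega
    have h := loopB_eq (tOf now step) halfN (by omega) halfN 1 (by omega) (by omega)
      (List.replicate (halfN + 1) (0 : Int)) (by simp)
      (by intro j h1 h2; omega) 0 0 (Or.inl ⟨rfl, rfl⟩)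
    rw [Nat.cast_one] at h
    rw [hcast, h]

-- ===== VERDICT (by name: the statement is the Claim_ definition above) =====
theorem check_spec : Claim_equal_check := by
  intro now step _ hpre
  unfold Spec_check
  rw [check_eq now step hpre, check_alt_eq now step hpre]
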